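-- pv_equiv track=rewrite | github.com/odoo/odoo | odoo/addons/base/tests/test_ir_translation.py | _transform
-- ===== SOURCE A (Python) =====
-- def _transform(terms, transformations):
--     """Transform the terms with the provided transformations
--
--     :param list(str) terms: terms to transform
--     :param list(str) transformations: transformations to apply among upper, lower and spaces
--     :return: transformed terms
--     """
--     if not transformations:
--         return terms
--     for transformation in transformations:
--         if transformation == 'upper':
--             terms = [term.upper() for term in terms]
--         elif transformation == 'lower':
--             terms = [term.lower() for term in terms]
--         elif transformation == 'spaces':
--             terms = [f'  {term.lower()}  ' for term in terms]
--         else: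
--             raise NotImplementedError(f'Transformation {transformation} not implemented')
--     return terms
-- ===== SOURCE B (Python) =====
-- def _apply_steps(steps, term):
--     for f in steps:
--         term = f(term)
--     return term
--
-- def _transform(terms, transformations):
--     if not transformations:
--         return terms
--     steps = []
--     for transformation in transformations:
--         if transformation == 'upper':
--             steps.append(str.upper)
--         elif transformation == 'lower':
--             steps.append(str.lower)
--         elif transformation == 'spaces':
--             steps.append(lambda s: f'  {s.lower()}  ')
--         else:
--             raise NotImplementedError(f'Transformation {transformation} not implemented')
--     return [_apply_steps(steps, term) for term in terms]
-- ===== Notes on version B (the rewrite author's own statement) =====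
-- stated objective: alternative
-- what changed: B builds a table of callable steps once and applies the composed pipeline per term in a single pass, instead of A's rebuilding the whole terms list once per transformation.
import Mathlib
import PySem

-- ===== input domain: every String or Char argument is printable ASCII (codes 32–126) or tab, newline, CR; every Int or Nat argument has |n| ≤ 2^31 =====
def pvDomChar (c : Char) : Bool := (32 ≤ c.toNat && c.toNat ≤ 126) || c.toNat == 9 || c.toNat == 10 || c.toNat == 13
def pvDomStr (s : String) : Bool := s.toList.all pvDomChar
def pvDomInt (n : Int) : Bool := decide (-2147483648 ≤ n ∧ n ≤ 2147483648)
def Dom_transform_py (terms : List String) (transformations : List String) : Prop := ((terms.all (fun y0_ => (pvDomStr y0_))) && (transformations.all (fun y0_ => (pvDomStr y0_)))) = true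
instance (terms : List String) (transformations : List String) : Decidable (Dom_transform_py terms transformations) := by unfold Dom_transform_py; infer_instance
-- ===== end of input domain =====

-- B builds a step table once and applies the composed pipeline per term (one pass over terms),
-- instead of A's rebuilding the whole terms list once per transformation; same results, same cost class.


-- ===== PORT A =====
-- literal port of A: fold over transformations, rebuilding the terms list each time.
-- On an unknown transformation Python raises NotImplementedError; those inputs are excluded by Pre_
-- (the else branch here leaves terms unchanged, but is unreachable under Pre_).
def transform_py (terms : List String) (transformations : List String) : List String :=
  if transformations = [] then terms
  else
    transformations.foldl (fun ts transformation =>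
      if transformation = "upper" then ts.map PySem.Str.upper
      else if transformation = "lower" then ts.map PySem.Str.lower
      else if transformation = "spaces" then ts.map (fun term => "  " ++ PySem.Str.lower term ++ "  ")
      else ts) terms

-- ===== PORT B =====
-- B-side helpers: build the step table, then apply all steps to one term.
def pvStepOf (transformation : String) : String → String :=
  if transformation = "upper" then PySem.Str.upper
  else if transformation = "lower" then PySem.Str.lower
  else if transformation = "spaces" then fun s => "  " ++ PySem.Str.lower s ++ "  "
  else id  -- Python B raises NotImplementedError here; unreachable under Pre_

def pvApplySteps (steps : List (String → String)) (term : String) : String :=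
  steps.foldl (fun s f => f s) term

def transform_py_alt (terms : List String) (transformations : List String) : List String :=
  if transformations = [] then terms
  else
    let steps := transformations.map pvStepOf
    terms.map (fun term => pvApplySteps steps term)

-- ===== PRECONDITION & SPEC =====
-- Pre_ excludes exactly the inputs where Python A raises NotImplementedError:
-- any transformation outside {'upper','lower','spaces'}.
def Pre_transform_py (terms : List String) (transformations : List String) : Prop :=
  ∀ t ∈ transformations, t = "upper" ∨ t = "lower" ∨ t = "spaces"
instance (terms : List String) (transformations : List String) : Decidable (Pre_transform_py terms transformations) := by unfold Pre_transform_py; infer_instance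
def pvWitness_transform_py : List String × List String := (["Ab", "c D"], ["spaces", "upper"])

def Spec_transform_py (terms : List String) (transformations : List String) (out : List String) : Prop := out = transform_py_alt terms transformations
instance (terms : List String) (transformations : List String) (out : List String) : Decidable (Spec_transform_py terms transformations out) := by unfold Spec_transform_py; infer_instance

-- ===== CLAIM (what is proved, stated in full; the proofs are below) =====
def Claim_equal_transform_py : Prop := ∀ (terms : List String) (transformations : List String), Dom_transform_py terms transformations → Pre_transform_py terms transformations → Spec_transform_py terms transformations (transform_py terms transformations)

-- ===== LEMMAS AND PROOFS =====

-- transposing the two loops: A's fold of maps equals one map of folded steps.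
theorem pv_transpose (l : List String) (ts : List String) :
    l.foldl (fun ts transformation =>
      if transformation = "upper" then ts.map PySem.Str.upper
      else if transformation = "lower" then ts.map PySem.Str.lower
      else if transformation = "spaces" then ts.map (fun term => "  " ++ PySem.Str.lower term ++ "  ")
      else ts) ts
    = ts.map (fun term => pvApplySteps (l.map pvStepOf) term) := by
  induction l generalizing ts with
  | nil => simp [pvApplySteps]
  | cons tr rest ih =>
      simp only [List.foldl_cons, List.map_cons]
      rw [ih]
      by_cases h1 : tr = "upper"
      · simp [h1, pvStepOf, pvApplySteps, List.map_map, Function.comp]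
      · by_cases h2 : tr = "lower"
        · simp [h2, pvStepOf, pvApplySteps, List.map_map, Function.comp]
        · by_cases h3 : tr = "spaces"
          · simp [h3, pvStepOf, pvApplySteps, List.map_map, Function.comp]
          · simp [h1, h2, h3, pvStepOf, pvApplySteps]

-- ===== VERDICT (by name: the statement is the Claim_ definition above) =====
theorem transform_py_spec : Claim_equal_transform_py := by
  intro terms transformations _ _
  unfold Spec_transform_py transform_py transform_py_alt
  split_ifs with h
  · rfl
  · exact pv_transpose transformations terms
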